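-- pv_equiv track=rewrite | github.com/danyaalu/counter-machine | brute-force/busy_beaver.py | normalize_program
-- ===== SOURCE A (Python) =====
-- def normalize_program(program, max_register):
--     register_map = {}
--     next_register = 1
--     normalized = []
--
--     for instruction in program:
--         if instruction == 'HALT':
--             normalized.append('HALT')
--             continue
--
--         parts = instruction.split()
--         opcode = parts[0]
--
--         # Process register references and map them to canonical names
--         if opcode in ['IF', 'DEC', 'INC', 'CLR']:
--             reg = int(parts[1])
--             if reg not in register_map:
--                 register_map[reg] = next_register
--                 next_register += 1
--
--             if opcode == 'IF':
--                 # IF <reg> <line>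
--                 normalized.append(f"{opcode} {register_map[reg]} {parts[2]}")
--             else:
--                 # DEC/INC/CLR <reg>
--                 normalized.append(f"{opcode} {register_map[reg]}")
--
--         elif opcode == 'COPY':
--             # COPY <src> <dst>
--             src = int(parts[1])
--             dst = int(parts[2])
--
--             if src not in register_map:
--                 register_map[src] = next_register
--                 next_register += 1
--             if dst not in register_map:
--                 register_map[dst] = next_register
--                 next_register += 1
--
--             normalized.append(f"{opcode} {register_map[src]} {register_map[dst]}")
--
--         elif opcode == 'GOTO':
--             # GOTO <line> - no register references
--             normalized.append(instruction)
--
--     return tuple(normalized)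
-- ===== SOURCE B (Python) =====
-- def normalize_program(program, max_register):
--     # Two-pass re-implementation: first build the complete canonical register map,
--     # then format every instruction against the finished map.
--     register_map = {}
--     for instruction in program:
--         if instruction == 'HALT':
--             continue
--         parts = instruction.split()
--         opcode = parts[0]
--         if opcode in ('IF', 'DEC', 'INC', 'CLR'):
--             regs = [int(parts[1])]
--         elif opcode == 'COPY':
--             regs = [int(parts[1]), int(parts[2])]
--         else:
--             regs = []
--         for reg in regs:
--             if reg not in register_map:
--                 register_map[reg] = len(register_map) + 1
--     out = []
--     for instruction in program:
--         if instruction == 'HALT':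
--             out.append('HALT')
--             continue
--         parts = instruction.split()
--         opcode = parts[0]
--         if opcode == 'IF':
--             out.append(f"IF {register_map[int(parts[1])]} {parts[2]}")
--         elif opcode in ('DEC', 'INC', 'CLR'):
--             out.append(f"{opcode} {register_map[int(parts[1])]}")
--         elif opcode == 'COPY':
--             out.append(f"COPY {register_map[int(parts[1])]} {register_map[int(parts[2])]}")
--         elif opcode == 'GOTO':
--             out.append(instruction)
--     return tuple(out)
-- ===== Notes on version B (the rewrite author's own statement) =====
-- stated objective: alternative
-- what changed: Replaces A's single interleaved loop (incremental register map, a running next_register counter, formatting with the partial map) by two passes: pass 1 builds the complete canonical register map, numbering new registers by current map size; pass 2 formats every instruction against the finished map.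
import Mathlib
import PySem

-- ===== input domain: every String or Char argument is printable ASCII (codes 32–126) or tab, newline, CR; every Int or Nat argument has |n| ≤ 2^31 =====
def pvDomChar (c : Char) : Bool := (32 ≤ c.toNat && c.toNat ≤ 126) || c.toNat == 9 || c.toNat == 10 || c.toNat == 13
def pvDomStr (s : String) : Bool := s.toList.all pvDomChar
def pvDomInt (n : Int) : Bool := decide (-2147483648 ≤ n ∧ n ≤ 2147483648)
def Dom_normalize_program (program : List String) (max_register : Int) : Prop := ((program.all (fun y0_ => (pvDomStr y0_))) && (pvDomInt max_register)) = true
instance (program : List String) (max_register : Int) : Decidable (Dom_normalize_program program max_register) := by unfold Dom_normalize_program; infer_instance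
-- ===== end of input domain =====

-- B rebuilds the result in two passes (complete register map first, then formatting) instead of A's
-- single interleaved loop; same cost, different decomposition.

-- ===== PORT A =====
-- one loop iteration of A: state = (register_map, next_register, normalized)
def pvAStep (st : PySem.Dict Int Int × Int × List String) (instruction : String) :
    PySem.Dict Int Int × Int × List String :=
  let register_map := st.1
  let next_register := st.2.1
  let normalized := st.2.2
  if instruction = "HALT" then (register_map, next_register, normalized ++ ["HALT"])
  else
    let parts := PySem.Str.split₀ instruction
    let opcode := PySem.List.pyGetD parts 0 ""  -- parts[0]; Pre_ guarantees parts ≠ []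
    if opcode = "IF" ∨ opcode = "DEC" ∨ opcode = "INC" ∨ opcode = "CLR" then
      -- int(parts[1]); Pre_ guarantees the index exists and the parse succeeds
      let reg := (PySem.Int.ofStr? (PySem.List.pyGetD parts 1 "")).getD 0
      let p := if register_map.contains reg then (register_map, next_register)
               else (register_map.insert reg next_register, next_register + 1)
      if opcode = "IF" then
        (p.1, p.2, normalized ++ [opcode ++ " " ++ PySem.Int.toStr (p.1.getD reg 0) ++ " " ++ PySem.List.pyGetD parts 2 ""])
      else
        (p.1, p.2, normalized ++ [opcode ++ " " ++ PySem.Int.toStr (p.1.getD reg 0)])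
    else if opcode = "COPY" then
      let src := (PySem.Int.ofStr? (PySem.List.pyGetD parts 1 "")).getD 0
      let dst := (PySem.Int.ofStr? (PySem.List.pyGetD parts 2 "")).getD 0
      let p := if register_map.contains src then (register_map, next_register)
               else (register_map.insert src next_register, next_register + 1)
      let q := if p.1.contains dst then p else (p.1.insert dst p.2, p.2 + 1)
      (q.1, q.2, normalized ++ [opcode ++ " " ++ PySem.Int.toStr (q.1.getD src 0) ++ " " ++ PySem.Int.toStr (q.1.getD dst 0)])
    else if opcode = "GOTO" then
      (register_map, next_register, normalized ++ [instruction])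
    else
      (register_map, next_register, normalized)

def normalize_program (program : List String) (max_register : Int) : List String :=
  (program.foldl pvAStep (PySem.Dict.empty, 1, [])).2.2

-- ===== PORT B =====
-- register references of one instruction, in A's first-appearance order
def pvRegsOf (instruction : String) : List Int :=
  if instruction = "HALT" then []
  else
    let parts := PySem.Str.split₀ instruction
    let opcode := PySem.List.pyGetD parts 0 ""
    if opcode = "IF" ∨ opcode = "DEC" ∨ opcode = "INC" ∨ opcode = "CLR" then
      [(PySem.Int.ofStr? (PySem.List.pyGetD parts 1 "")).getD 0]
    else if opcode = "COPY" then
      [(PySem.Int.ofStr? (PySem.List.pyGetD parts 1 "")).getD 0,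
       (PySem.Int.ofStr? (PySem.List.pyGetD parts 2 "")).getD 0]
    else []

-- register_map[reg] = len(register_map) + 1 if reg not yet present
def pvRegister (d : PySem.Dict Int Int) (reg : Int) : PySem.Dict Int Int :=
  if d.contains reg then d else d.insert reg ((d.size : Int) + 1)

-- pass 1: the complete canonical register map
def pvBuildMap (program : List String) : PySem.Dict Int Int :=
  program.foldl (fun d i => (pvRegsOf i).foldl pvRegister d) PySem.Dict.empty

-- pass 2: format one instruction against the finished map (zero or one output line)
def pvEmit (m : PySem.Dict Int Int) (instruction : String) : List String :=
  if instruction = "HALT" then ["HALT"]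
  else
    let parts := PySem.Str.split₀ instruction
    let opcode := PySem.List.pyGetD parts 0 ""
    if opcode = "IF" then
      ["IF " ++ PySem.Int.toStr (m.getD ((PySem.Int.ofStr? (PySem.List.pyGetD parts 1 "")).getD 0) 0) ++ " " ++ PySem.List.pyGetD parts 2 ""]
    else if opcode = "DEC" ∨ opcode = "INC" ∨ opcode = "CLR" then
      [opcode ++ " " ++ PySem.Int.toStr (m.getD ((PySem.Int.ofStr? (PySem.List.pyGetD parts 1 "")).getD 0) 0)]
    else if opcode = "COPY" then
      ["COPY " ++ PySem.Int.toStr (m.getD ((PySem.Int.ofStr? (PySem.List.pyGetD parts 1 "")).getD 0) 0) ++ " " ++ PySem.Int.toStr (m.getD ((PySem.Int.ofStr? (PySem.List.pyGetD parts 2 "")).getD 0) 0)]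
    else if opcode = "GOTO" then [instruction]
    else []

def normalize_program_alt (program : List String) (max_register : Int) : List String :=
  let register_map := pvBuildMap program
  program.foldl (fun out i => out ++ pvEmit register_map i) []

-- ===== PRECONDITION & SPEC =====
-- Pre_ excludes exactly the instructions on which Python A raises: a non-'HALT' instruction that
-- splits to no words (IndexError on parts[0]), or a register opcode missing its operands
-- (IndexError) or with a non-integer register field (ValueError).
def pvOkInstr (instruction : String) : Prop :=
  instruction = "HALT" ∨
  (PySem.Str.split₀ instruction ≠ [] ∧
   (PySem.List.pyGetD (PySem.Str.split₀ instruction) 0 "" = "IF" →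
      3 ≤ (PySem.Str.split₀ instruction).length ∧
      (PySem.Int.ofStr? (PySem.List.pyGetD (PySem.Str.split₀ instruction) 1 "")).isSome = true) ∧
   ((PySem.List.pyGetD (PySem.Str.split₀ instruction) 0 "" = "DEC" ∨
     PySem.List.pyGetD (PySem.Str.split₀ instruction) 0 "" = "INC" ∨
     PySem.List.pyGetD (PySem.Str.split₀ instruction) 0 "" = "CLR") →
      2 ≤ (PySem.Str.split₀ instruction).length ∧
      (PySem.Int.ofStr? (PySem.List.pyGetD (PySem.Str.split₀ instruction) 1 "")).isSome = true) ∧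
   (PySem.List.pyGetD (PySem.Str.split₀ instruction) 0 "" = "COPY" →
      3 ≤ (PySem.Str.split₀ instruction).length ∧
      (PySem.Int.ofStr? (PySem.List.pyGetD (PySem.Str.split₀ instruction) 1 "")).isSome = true ∧
      (PySem.Int.ofStr? (PySem.List.pyGetD (PySem.Str.split₀ instruction) 2 "")).isSome = true))

def Pre_normalize_program (program : List String) (max_register : Int) : Prop :=
  ∀ i ∈ program, pvOkInstr i

instance (program : List String) (max_register : Int) : Decidable (Pre_normalize_program program max_register) := by
  unfold Pre_normalize_program pvOkInstr; infer_instance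

def pvWitness_normalize_program : List String × Int :=
  (["INC 3", "IF 3 0", "COPY 3 5", "GOTO 2", "HALT"], 5)

def Spec_normalize_program (program : List String) (max_register : Int) (out : List String) : Prop := out = normalize_program_alt program max_register
instance (program : List String) (max_register : Int) (out : List String) : Decidable (Spec_normalize_program program max_register out) := by unfold Spec_normalize_program; infer_instance

-- ===== CLAIM (what is proved, stated in full; the proofs are below) =====
def Claim_equal_normalize_program : Prop := ∀ (program : List String) (max_register : Int), Dom_normalize_program program max_register → Pre_normalize_program program max_register → Spec_normalize_program program max_register (normalize_program program max_register)

-- ===== LEMMAS AND PROOFS =====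

theorem pvRegister_get?_some (d : PySem.Dict Int Int) (r k : Int) (v : Int)
    (h : d.get? k = some v) : (pvRegister d r).get? k = some v := by
  unfold pvRegister
  split_ifs with hc
  · exact h
  · have hne : k ≠ r := by
      intro he; subst he
      simp [PySem.Dict.contains_eq_isSome_get?, h] at hc
    rw [PySem.Dict.get?_insert]
    simp [hne, h]

theorem pvFoldRegister_get?_some (rs : List Int) (d : PySem.Dict Int Int) (k : Int) (v : Int)
    (h : d.get? k = some v) : (rs.foldl pvRegister d).get? k = some v := by
  induction rs generalizing d with
  | nil => exact h
  | cons r rs ih => exact ih _ (pvRegister_get?_some d r k v h)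

theorem pvFoldRegister_mem (rs : List Int) (d : PySem.Dict Int Int) (r : Int)
    (h : r ∈ rs) : ∃ v, (rs.foldl pvRegister d).get? r = some v := by
  induction rs generalizing d with
  | nil => cases h
  | cons a rs ih =>
    rcases List.mem_cons.mp h with he | hm
    · subst he
      have : ∃ v, (pvRegister d r).get? r = some v := by
        unfold pvRegister
        split_ifs with hc
        · rw [PySem.Dict.contains_eq_isSome_get?] at hc
          exact ⟨(d.get? r).get hc, (Option.some_get hc).symm⟩
        · exact ⟨_, PySem.Dict.get?_insert_self d r _⟩
      obtain ⟨v, hv⟩ := this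
      exact ⟨v, pvFoldRegister_get?_some rs _ r v hv⟩
    · exact ih _ hm

theorem pvExtend_get?_some (l : List String) (d : PySem.Dict Int Int) (k : Int) (v : Int)
    (h : d.get? k = some v) :
    (l.foldl (fun d i => (pvRegsOf i).foldl pvRegister d) d).get? k = some v := by
  induction l generalizing d with
  | nil => exact h
  | cons i l ih => exact ih _ (pvFoldRegister_get?_some _ _ k v h)

theorem pvEmit_congr (m m' : PySem.Dict Int Int) (i : String)
    (h : ∀ r ∈ pvRegsOf i, m'.get? r = m.get? r) : pvEmit m' i = pvEmit m i := by
  unfold pvEmit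
  unfold pvRegsOf at h
  split_ifs at h ⊢ with h1 <;> simp_all [PySem.Dict.getD_eq_get?_getD]

theorem pvStep_eq (d : PySem.Dict Int Int) (acc : List String) (i : String) :
    pvAStep (d, (d.size : Int) + 1, acc) i =
      ((pvRegsOf i).foldl pvRegister d,
       (((pvRegsOf i).foldl pvRegister d).size : Int) + 1,
       acc ++ pvEmit ((pvRegsOf i).foldl pvRegister d) i) := by
  unfold pvAStep pvRegsOf pvEmit pvRegister
  by_cases h0 : i = "HALT"
  · simp [h0]
  · simp only [h0, if_false]
    split_ifs with h1 h2 h3 h4 h5 h6 h7 h8 <;>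
      simp_all [PySem.Dict.size_insert, PySem.Dict.contains_eq_isSome_get?]

theorem pvLoop_eq (rest : List String) : ∀ (d : PySem.Dict Int Int) (acc : List String),
    (rest.foldl pvAStep (d, (d.size : Int) + 1, acc)).2.2 =
      rest.foldl
        (fun out i => out ++ pvEmit (rest.foldl (fun d i => (pvRegsOf i).foldl pvRegister d) d) i)
        acc := by
  induction rest with
  | nil => intro d acc; rfl
  | cons i rest ih =>
    intro d acc
    have hstep := pvStep_eq d acc i
    simp only [List.foldl_cons, hstep]
    rw [ih]
    have hemit : pvEmit (rest.foldl (fun d i => (pvRegsOf i).foldl pvRegister d) ((pvRegsOf i).foldl pvRegister d)) i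
        = pvEmit ((pvRegsOf i).foldl pvRegister d) i := by
      apply pvEmit_congr
      intro r hr
      obtain ⟨v, hv⟩ := pvFoldRegister_mem (pvRegsOf i) d r hr
      rw [hv, pvExtend_get?_some _ _ r v hv]
    rw [hemit]

-- ===== VERDICT (by name: the statement is the Claim_ definition above) =====
theorem normalize_program_spec : Claim_equal_normalize_program := by
  intro program max_register _ _
  unfold Spec_normalize_program normalize_program normalize_program_alt pvBuildMap
  have h0 : (1 : Int) = ((PySem.Dict.empty : PySem.Dict Int Int).size : Int) + 1 := by
    rw [PySem.Dict.size_empty]; rfl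
  rw [h0, pvLoop_eq]
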